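-- pv_equiv track=rewrite | github.com/JsebastianUVPRQ/leetcode_solutions | test/palindromo.py | is_almost_palindrome
-- ===== SOURCE A (Python) =====
-- def is_almost_palindrome(word):
--     if word == word[::-1]:
--         return "yes"
--     else:
--         for i in range(len(word)):
--             if word[i] != word[-i-1]:
--                 new_word = word[:i] + word[-i-1] + word[i+1:]
--                 if new_word == new_word[::-1]:
--                     return "yes"
--                 else:
--                     return "no"
-- ===== SOURCE B (Python) =====
-- def is_almost_palindrome(word):
--     n = len(word)
--     mismatches = sum(1 for i in range(n // 2) if word[i] != word[n - 1 - i])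
--     return "yes" if mismatches <= 1 else "no"
-- ===== Notes on version B (the rewrite author's own statement) =====
-- stated objective: simpler
-- what changed: B counts mismatched symmetric pairs in one half-length pass and answers yes iff at most one, eliminating A's whole-string reversals, first-mismatch search and rebuilt new_word entirely.
import Mathlib
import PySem

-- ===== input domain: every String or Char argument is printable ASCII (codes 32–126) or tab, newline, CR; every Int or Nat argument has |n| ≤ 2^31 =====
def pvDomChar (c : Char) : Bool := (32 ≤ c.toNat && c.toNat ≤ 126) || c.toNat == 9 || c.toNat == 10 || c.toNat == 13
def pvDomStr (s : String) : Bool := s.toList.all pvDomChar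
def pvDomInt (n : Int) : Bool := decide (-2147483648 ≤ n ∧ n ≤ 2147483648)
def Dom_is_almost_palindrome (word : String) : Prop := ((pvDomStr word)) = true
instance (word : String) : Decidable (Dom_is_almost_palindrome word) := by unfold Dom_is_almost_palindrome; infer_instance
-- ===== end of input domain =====

-- B replaces A's palindrome tests on the word and a rebuilt new_word by a single
-- half-length pass counting mismatched symmetric pairs (yes iff at most one);
-- objective: simpler (no reversal, no string rebuilding, no first-mismatch search).

-- ===== PORT A =====
-- A's for-loop over range(len(word)); the guard i < length keeps word[i] and
-- word[-i-1] in range, so getD is exact here (word[-i-1] is position length-1-i).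
-- The final "" is Python's implicit `return None` after the loop, unreachable
-- because the loop is only entered when word is not a palindrome.
def pvALoop (cs : List Char) (i : Nat) : String :=
  if i < cs.length then
    if cs.getD i ' ' ≠ cs.getD (cs.length - 1 - i) ' ' then
      -- new_word = word[:i] + word[-i-1] + word[i+1:]
      let nw := cs.take i ++ [cs.getD (cs.length - 1 - i) ' '] ++ cs.drop (i + 1)
      if nw = nw.reverse then "yes" else "no"
    else pvALoop cs (i + 1)
  else ""
termination_by cs.length - i

def is_almost_palindrome (word : String) : String :=
  let cs := word.toList
  if cs = cs.reverse then "yes" else pvALoop cs 0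

-- ===== PORT B =====
-- sum(1 for i in range(n // 2) if word[i] != word[n-1-i]); indices are in range
-- whenever the range is nonempty, so getD is exact
def is_almost_palindrome_alt (word : String) : String :=
  let cs := word.toList
  let n := cs.length
  let m := (List.range (n / 2)).countP (fun i => cs.getD i ' ' != cs.getD (n - 1 - i) ' ')
  if m ≤ 1 then "yes" else "no"

-- ===== PRECONDITION & SPEC =====
def Spec_is_almost_palindrome (word : String) (out : String) : Prop := out = is_almost_palindrome_alt word
instance (word : String) (out : String) : Decidable (Spec_is_almost_palindrome word out) := by unfold Spec_is_almost_palindrome; infer_instance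

-- ===== CLAIM (what is proved, stated in full; the proofs are below) =====
def Claim_equal_is_almost_palindrome : Prop := ∀ (word : String), Dom_is_almost_palindrome word → Spec_is_almost_palindrome word (is_almost_palindrome word)

-- ===== LEMMAS AND PROOFS =====

-- palindromy as a pointwise condition on matched pairs
theorem pv_pal_iff (cs : List Char) :
    cs = cs.reverse ↔ ∀ i < cs.length, cs.getD i ' ' = cs.getD (cs.length - 1 - i) ' ' := by
  constructor
  · intro h i hi
    conv_lhs => rw [h]
    rw [List.getD_eq_getElem _ _ (by simpa using hi),
        List.getD_eq_getElem _ _ (by omega)]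
    simp [List.getElem_reverse]
  · intro h
    apply List.ext_getElem (by simp)
    intro i hi _
    have h2 := h (cs.length - 1 - i) (by omega)
    rw [List.getD_eq_getElem _ _ (by omega), List.getD_eq_getElem _ _ (by omega)] at h2
    rw [List.getElem_reverse]
    have h3 : cs[cs.length - 1 - i]'(by omega) = cs[cs.length - 1 - (cs.length - 1 - i)]'(by omega) := h2
    rw [h3]
    congr 1
    omega

-- all pairs match iff the first-half pairs match
theorem pv_half (cs : List Char) :
    (∀ i < cs.length, cs.getD i ' ' = cs.getD (cs.length - 1 - i) ' ') ↔
    (∀ i < cs.length / 2, cs.getD i ' ' = cs.getD (cs.length - 1 - i) ' ') := by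
  constructor
  · intro h i hi
    exact h i (by omega)
  · intro h i hi
    by_cases h1 : i < cs.length / 2
    · exact h i h1
    · by_cases h2 : cs.length - 1 - i < cs.length / 2
      · have hk := h (cs.length - 1 - i) h2
        have he : cs.length - 1 - (cs.length - 1 - i) = i := by omega
        rw [he] at hk
        exact hk.symm
      · have : cs.length - 1 - i = i := by omega
        rw [this]

-- A's loop, started at any l ≤ i0 with all earlier pairs matching, stops exactly at i0
theorem pvALoop_reach (cs : List Char) (i0 : Nat) (hi0 : i0 < cs.length)
    (hmis : cs.getD i0 ' ' ≠ cs.getD (cs.length - 1 - i0) ' ')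
    (hpre : ∀ k < i0, cs.getD k ' ' = cs.getD (cs.length - 1 - k) ' ') :
    ∀ l ≤ i0, pvALoop cs l =
      (if cs.take i0 ++ [cs.getD (cs.length - 1 - i0) ' '] ++ cs.drop (i0 + 1) =
          (cs.take i0 ++ [cs.getD (cs.length - 1 - i0) ' '] ++ cs.drop (i0 + 1)).reverse
       then "yes" else "no") := by
  intro l hl
  rcases eq_or_lt_of_le hl with h | h
  · subst h
    rw [pvALoop, if_pos hi0, if_pos hmis]
  · rw [pvALoop, if_pos (by omega), if_neg (by simpa using hpre l h)]
    exact pvALoop_reach cs i0 hi0 hmis hpre (l + 1) h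
termination_by l => i0 - l

-- new_word is cs with position i0 overwritten
theorem pv_nw_set (cs : List Char) (i0 : Nat) (hi0 : i0 < cs.length) :
    cs.take i0 ++ [cs.getD (cs.length - 1 - i0) ' '] ++ cs.drop (i0 + 1) =
      cs.set i0 (cs.getD (cs.length - 1 - i0) ' ') := by
  rw [List.set_eq_take_append_cons_drop]
  simp
  intro h
  exact absurd hi0 (by omega)

-- getD of a set list, both positions in range
theorem pv_getD_set (cs : List Char) (i0 j : Nat) (b : Char) (hj : j < cs.length) :
    (cs.set i0 b).getD j ' ' = if j = i0 then b else cs.getD j ' ' := by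
  rw [List.getD_eq_getElem _ _ (by simpa using hj), List.getD_eq_getElem _ _ hj,
      List.getElem_set]
  split_ifs with h1 h2 h2
  · rfl
  · exact absurd h1.symm h2
  · exact absurd h2.symm h1
  · rfl

-- the rebuilt word is a palindrome iff every first-half pair except i0 matches
theorem pv_nw_pal_iff (cs : List Char) (i0 : Nat) (hlt : i0 < cs.length - 1 - i0) :
    (cs.set i0 (cs.getD (cs.length - 1 - i0) ' ') =
      (cs.set i0 (cs.getD (cs.length - 1 - i0) ' ')).reverse) ↔
    (∀ j < cs.length / 2, j ≠ i0 → cs.getD j ' ' = cs.getD (cs.length - 1 - j) ' ') := by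
  set b := cs.getD (cs.length - 1 - i0) ' ' with hb
  have hn : (cs.set i0 b).length = cs.length := by simp
  rw [pv_pal_iff, hn]
  have hstep : ∀ j < cs.length,
      ((cs.set i0 b).getD j ' ' = (cs.set i0 b).getD (cs.length - 1 - j) ' ') ↔
      ((if j = i0 then b else cs.getD j ' ') =
        (if cs.length - 1 - j = i0 then b else cs.getD (cs.length - 1 - j) ' ')) := by
    intro j hj
    rw [pv_getD_set cs i0 j b hj, pv_getD_set cs i0 (cs.length - 1 - j) b (by omega)]
  have hi0h : i0 < cs.length / 2 := by omega
  constructor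
  · intro h j hj hne
    have hc := (hstep j (by omega)).mp (h j (by omega))
    rw [if_neg hne, if_neg (by omega)] at hc
    exact hc
  · intro h j hj
    rw [hstep j hj]
    by_cases h1 : j = i0
    · subst h1
      rw [if_pos rfl, if_neg (by omega), hb]
    · by_cases h2 : cs.length - 1 - j = i0
      · rw [if_neg h1, if_pos h2, hb]
        have : cs.length - 1 - i0 = j := by omega
        rw [this]
      · rw [if_neg h1, if_neg h2]
        by_cases h3 : j < cs.length / 2
        · exact h j h3 h1
        · by_cases h4 : cs.length - 1 - j < cs.length / 2
          · have hk := h (cs.length - 1 - j) h4 h2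
            have he : cs.length - 1 - (cs.length - 1 - j) = j := by omega
            rw [he] at hk
            exact hk.symm
          · have : cs.length - 1 - j = j := by omega
            rw [this]

-- nodup lists: all elements equal → length ≤ 1; two distinct members → length ≥ 2
theorem pv_len_le_one {α : Type} (l : List α) (hn : l.Nodup) (a : α)
    (h : ∀ x ∈ l, x = a) : l.length ≤ 1 := by
  cases l with
  | nil => simp
  | cons x xs =>
    cases xs with
    | nil => simp
    | cons y ys =>
      exfalso
      have hx : x = a := h x (by simp)
      have hy : y = a := h y (by simp)
      simp [List.nodup_cons] at hn
      exact hn.1.1 (hx.trans hy.symm)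

theorem pv_two_le_len {α : Type} (l : List α) (hn : l.Nodup) (a b : α)
    (ha : a ∈ l) (hb : b ∈ l) (hab : a ≠ b) : 2 ≤ l.length := by
  cases l with
  | nil => simp at ha
  | cons x xs =>
    cases xs with
    | nil =>
      simp at ha hb
      exact absurd (ha.trans hb.symm) hab
    | cons y ys => simp

-- the mismatch count of B is ≤ 1 iff every first-half pair except i0 matches,
-- given that i0 itself mismatches and is in the first half
theorem pv_count_iff (cs : List Char) (i0 : Nat) (hi0 : i0 < cs.length / 2)
    (hmis : cs.getD i0 ' ' ≠ cs.getD (cs.length - 1 - i0) ' ') :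
    ((List.range (cs.length / 2)).countP
        (fun i => cs.getD i ' ' != cs.getD (cs.length - 1 - i) ' ') ≤ 1) ↔
    (∀ j < cs.length / 2, j ≠ i0 → cs.getD j ' ' = cs.getD (cs.length - 1 - j) ' ') := by
  rw [List.countP_eq_length_filter]
  set p : Nat → Bool := fun i => cs.getD i ' ' != cs.getD (cs.length - 1 - i) ' ' with hp
  have hnodup : ((List.range (cs.length / 2)).filter p).Nodup :=
    List.Nodup.filter p (List.nodup_range)
  have hi0mem : i0 ∈ (List.range (cs.length / 2)).filter p := by
    rw [List.mem_filter, List.mem_range]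
    exact ⟨hi0, by simpa [hp] using hmis⟩
  constructor
  · intro h j hj hne
    by_contra hjm
    have hjmem : j ∈ (List.range (cs.length / 2)).filter p := by
      rw [List.mem_filter, List.mem_range]
      exact ⟨hj, by simpa [hp] using hjm⟩
    have := pv_two_le_len _ hnodup i0 j hi0mem hjmem (Ne.symm hne)
    omega
  · intro h
    apply pv_len_le_one _ hnodup i0
    intro x hx
    rw [List.mem_filter, List.mem_range] at hx
    by_contra hne
    have hx2 : cs.getD x ' ' ≠ cs.getD (cs.length - 1 - x) ' ' := by
      simpa [hp] using hx.2
    exact hx2 (h x hx.1 hne)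

theorem is_almost_palindrome_eq (word : String) :
    is_almost_palindrome word = is_almost_palindrome_alt word := by
  unfold is_almost_palindrome is_almost_palindrome_alt
  simp only []
  set cs := word.toList with hcs
  by_cases hp : cs = cs.reverse
  · -- palindrome: count = 0
    have h := (pv_half cs).mp ((pv_pal_iff cs).mp hp)
    have hc : (List.range (cs.length / 2)).countP
        (fun i => cs.getD i ' ' != cs.getD (cs.length - 1 - i) ' ') = 0 := by
      rw [List.countP_eq_zero]
      intro i hi
      rw [List.mem_range] at hi
      simpa using h i hi
    rw [if_pos hp, hc]
    simp
  · -- not a palindrome: find the first mismatch i0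
    have h := hp
    rw [pv_pal_iff] at h
    push_neg at h
    obtain ⟨i, hi, hne⟩ := h
    have hex : ∃ k, k < cs.length ∧
        cs.getD k ' ' ≠ cs.getD (cs.length - 1 - k) ' ' := ⟨i, hi, hne⟩
    set i0 := Nat.find hex with hi0def
    obtain ⟨hi0n, hmis⟩ := Nat.find_spec hex
    rw [← hi0def] at hi0n hmis
    have hpre : ∀ k < i0, cs.getD k ' ' = cs.getD (cs.length - 1 - k) ' ' := by
      intro k hk
      have hmin := Nat.find_min hex hk
      push_neg at hmin
      exact hmin (by omega)
    have hlt : i0 < cs.length - 1 - i0 := by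
      rcases Nat.lt_trichotomy i0 (cs.length - 1 - i0) with hc | hc | hc
      · exact hc
      · exact absurd (show cs.getD i0 ' ' = cs.getD (cs.length - 1 - i0) ' ' by rw [← hc]) hmis
      · exfalso
        have hk := hpre (cs.length - 1 - i0) hc
        have he : cs.length - 1 - (cs.length - 1 - i0) = i0 := by omega
        rw [he] at hk
        exact hmis hk.symm
    have hA := pvALoop_reach cs i0 hi0n hmis hpre 0 (Nat.zero_le _)
    rw [if_neg hp, hA, pv_nw_set cs i0 hi0n]
    have hEq := (pv_nw_pal_iff cs i0 hlt).trans
      (pv_count_iff cs i0 (by omega) hmis).symm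
    by_cases hcond : (List.range (cs.length / 2)).countP
        (fun i => cs.getD i ' ' != cs.getD (cs.length - 1 - i) ' ') ≤ 1
    · rw [if_pos (hEq.mpr hcond), if_pos hcond]
    · rw [if_neg (fun hh => hcond (hEq.mp hh)), if_neg hcond]

-- ===== VERDICT (by name: the statement is the Claim_ definition above) =====
theorem is_almost_palindrome_spec : Claim_equal_is_almost_palindrome := by
  intro word _
  exact is_almost_palindrome_eq word
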